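-- pv_equiv track=rewrite | github.com/AnuR1234/Master_Thesis_codebase | RAG Architectures/Closed-RAG Implementation/stream_lit.py | clean_document_content
-- ===== SOURCE A (Python) =====
-- def clean_document_content(text: str) -> str:
--     """
--     Clean up document content by removing duplicated titles and improving formatting.
--
--     This function processes raw document content to remove common formatting issues
--     such as repeated titles, excessive blank lines, and other artifacts that may
--     appear in the retrieved document contexts.
--
--     Args:
--         text: Raw document content string to be cleaned
--
--     Returns:
--         Cleaned document content with improved formatting
--
--     Examples:
--         >>> content = "Title\\nTitle\\n\\nSome content here..."
--         >>> clean_document_content(content)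
--         "Title\\n\\nSome content here..."
--     """
--     if not text:
--         return ""
--
--     # Split text into lines
--     lines = text.strip().split('\n')
--
--     # Case 1: Remove identical repeated lines at the beginning
--     if len(lines) >= 2 and lines[0] == lines[1]:
--         lines = lines[1:]
--
--     # Case 2: If first line is just the title and appears in first paragraph
--     if len(lines) >= 3 and lines[0].strip() and lines[1].strip() == '':
--         first_line = lines[0].strip()
--         if any(line.startswith(first_line) for line in lines[2:5]):
--             lines = lines[1:]
--
--     # Remove excessive blank lines (more than 2 consecutive newlines)
--     cleaned_lines = []
--     empty_count = 0
--
--     for line in lines: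
--         if not line.strip():
--             empty_count += 1
--             if empty_count > 2:
--                 continue
--         else:
--             empty_count = 0
--         cleaned_lines.append(line)
--
--     return '\n'.join(cleaned_lines)
-- ===== SOURCE B (Python) =====
-- def clean_document_content(text: str) -> str:
--     if not text:
--         return ""
--     lines = text.strip().split('\n')
--     # Trim stage 1: drop a duplicated first line (pattern match instead of index tests)
--     match lines:
--         case [a, b, *rest] if a == b:
--             lines = [b, *rest]
--     # Trim stage 2: drop a title line repeated at the start of the first paragraph
--     match lines:
--         case [a, b, *rest] if a.strip() and not b.strip() and any(
--                 l.startswith(a.strip()) for l in rest[:3]):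
--             lines = [b, *rest]
--     # Blank-collapse by runs: walk runs of blank lines, keep at most the first two
--     out = []
--     i, n = 0, len(lines)
--     while i < n:
--         if lines[i].strip():
--             out.append(lines[i])
--             i += 1
--         else:
--             j = i
--             while j < n and not lines[j].strip():
--                 j += 1
--             out.extend(lines[i:min(j, i + 2)])
--             i = j
--     return '\n'.join(out)
-- ===== Notes on version B (the rewrite author's own statement) =====
-- stated objective: alternative
-- what changed: The two index/length-guarded trim conditionals become structural pattern matches on the line list, and the stateful blank-collapse loop with a running empty_count is replaced by a run-based walk that finds each maximal run of blank lines and keeps at most its first two lines.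
import Mathlib
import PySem

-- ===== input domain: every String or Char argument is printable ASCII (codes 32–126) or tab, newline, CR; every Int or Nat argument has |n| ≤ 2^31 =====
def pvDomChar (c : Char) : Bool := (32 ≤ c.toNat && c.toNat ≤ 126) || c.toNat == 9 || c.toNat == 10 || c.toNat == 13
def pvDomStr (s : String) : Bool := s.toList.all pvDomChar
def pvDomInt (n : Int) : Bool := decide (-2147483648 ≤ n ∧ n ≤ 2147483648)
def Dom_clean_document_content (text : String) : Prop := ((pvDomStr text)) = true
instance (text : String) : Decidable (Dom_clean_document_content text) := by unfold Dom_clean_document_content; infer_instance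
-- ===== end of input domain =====

-- B recasts the trim conditionals as structural pattern matches and replaces A's
-- running empty_count loop by a run-based walk (keep at most the first two lines of
-- each maximal blank run); objective: alternative decomposition, same cost.

-- ===== PORT A =====
-- the body of A's 'for line in lines' loop (state: cleaned_lines, empty_count)
def cdcStep (st : List String × Int) (line : String) : List String × Int :=
  if PySem.Str.strip line == "" then
    let c := st.2 + 1
    if c > 2 then (st.1, c) else (st.1 ++ [line], c)
  else (st.1 ++ [line], 0)

def clean_document_content (text : String) : String :=
  if text == "" then "" else
  let lines := (PySem.Str.split? (PySem.Str.strip text) "\n").getD []  -- split? is none only for sep = ""; sep is "\n", so this is exact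
  let lines :=
    if 2 ≤ lines.length ∧ PySem.List.pyGetD lines 0 "" = PySem.List.pyGetD lines 1 "" then
      PySem.List.slice lines (some 1) none
    else lines
  let lines :=
    if 3 ≤ lines.length ∧ PySem.Str.strip (PySem.List.pyGetD lines 0 "") ≠ "" ∧
        PySem.Str.strip (PySem.List.pyGetD lines 1 "") = "" then
      let first_line := PySem.Str.strip (PySem.List.pyGetD lines 0 "")
      if (PySem.List.slice lines (some 2) (some 5)).any
          (fun line => PySem.Str.startswith line first_line) then
        PySem.List.slice lines (some 1) none
      else lines
    else lines
  PySem.Str.join "\n" (lines.foldl cdcStep ([], 0)).1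

-- ===== PORT B =====
-- B's first 'match' statement: drop a duplicated first line
def cdcTrim1 : List String → List String
  | a :: b :: rest => if a = b then b :: rest else a :: b :: rest
  | ls => ls

-- B's second 'match' statement: drop a title line repeated in the first paragraph
def cdcTrim2 : List String → List String
  | a :: b :: rest =>
    if PySem.Str.strip a ≠ "" ∧ PySem.Str.strip b = "" ∧
        (rest.take 3).any (fun l => PySem.Str.startswith l (PySem.Str.strip a)) then
      b :: rest
    else a :: b :: rest
  | ls => ls

-- B's run-based blank-collapse walk: a non-blank line is kept and the walk moves on;
-- a blank line starts a maximal blank run, of which at most the first two lines survive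
def cdcRuns : List String → List String
  | [] => []
  | l :: t =>
    if PySem.Str.strip l == "" then
      (l :: t.takeWhile (fun x => PySem.Str.strip x == "")).take 2 ++
        cdcRuns (t.dropWhile (fun x => PySem.Str.strip x == ""))
    else l :: cdcRuns t
termination_by ls => ls.length
decreasing_by
  · have := List.length_dropWhile_le (fun x => PySem.Str.strip x == "") t
    simp only [List.length_cons]; omega
  · simp

def clean_document_content_alt (text : String) : String :=
  if text == "" then "" else
  let lines := (PySem.Str.split? (PySem.Str.strip text) "\n").getD []  -- split? is none only for sep = ""; sep is "\n", so this is exact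
  PySem.Str.join "\n" (cdcRuns (cdcTrim2 (cdcTrim1 lines)))

-- ===== PRECONDITION & SPEC =====
def Spec_clean_document_content (text : String) (out : String) : Prop := out = clean_document_content_alt text
instance (text : String) (out : String) : Decidable (Spec_clean_document_content text out) := by unfold Spec_clean_document_content; infer_instance

-- ===== CLAIM (what is proved, stated in full; the proofs are below) =====
def Claim_equal_clean_document_content : Prop := ∀ (text : String), Dom_clean_document_content text → Spec_clean_document_content text (clean_document_content text)

-- ===== LEMMAS AND PROOFS =====
def cdcBlank (line : String) : Bool := PySem.Str.strip line == ""

-- canonical recursive form of A's blank-collapse, carrying the blankness of the two previous lines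
def cdcG (b2 b1 : Bool) : List String → List String
  | [] => []
  | l :: ls =>
    if cdcBlank l && b1 && b2 then cdcG b1 (cdcBlank l) ls
    else l :: cdcG b1 (cdcBlank l) ls

-- after a non-blank line the older blankness bit is irrelevant
lemma cdcG_false (b b' : Bool) (ls : List String) : cdcG b false ls = cdcG b' false ls := by
  cases ls with
  | nil => rfl
  | cons l t => simp [cdcG]

lemma cdcA (ls : List String) (acc : List String) (c : Int) (hc : 0 ≤ c) :
    (ls.foldl cdcStep (acc, c)).1 = acc ++ cdcG (decide (2 ≤ c)) (decide (1 ≤ c)) ls := by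
  induction ls generalizing acc c with
  | nil => simp [cdcG]
  | cons l t ih =>
    by_cases hb : (PySem.Str.strip l == "") = true
    · by_cases h2 : 2 ≤ c
      · have hs : cdcStep (acc, c) l = (acc, c + 1) := by
          simp only [cdcStep, hb, if_true]
          rw [if_pos (by omega)]
        have e1 : decide (2 ≤ c + 1) = true := by simp; omega
        have e2 : decide (1 ≤ c + 1) = true := by simp; omega
        have e3 : decide (2 ≤ c) = true := by simp; omega
        have e4 : decide (1 ≤ c) = true := by simp; omega
        rw [List.foldl_cons, hs, ih _ _ (by omega), e1, e2, e3, e4]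
        simp [cdcG, cdcBlank, hb]
      · have hs : cdcStep (acc, c) l = (acc ++ [l], c + 1) := by
          simp only [cdcStep, hb, if_true]
          rw [if_neg (by omega)]
        have e1 : decide (2 ≤ c + 1) = decide (1 ≤ c) := by
          rcases Bool.eq_false_or_eq_true (decide (1 ≤ c)) with h | h <;>
            simp_all <;> omega
        have e2 : decide (1 ≤ c + 1) = true := by simp; omega
        have e3 : decide (2 ≤ c) = false := by simp; omega
        rw [List.foldl_cons, hs, ih _ _ (by omega), e1, e2, e3]
        simp [cdcG, cdcBlank, hb]
    · have hbf : cdcBlank l = false := by simpa [cdcBlank] using hb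
      have hs : cdcStep (acc, c) l = (acc ++ [l], 0) := by
        simp only [cdcStep, hb, Bool.false_eq_true, if_false]
      have d1 : decide (2 ≤ (0:Int)) = false := by decide
      have d2 : decide (1 ≤ (0:Int)) = false := by decide
      rw [List.foldl_cons, hs, ih _ _ (by omega), d1, d2,
        cdcG_false false (decide (1 ≤ c)) t]
      simp [cdcG, hbf]

-- A's collapse from the fresh state equals B's run-based walk
lemma cdcG_runs (t : List String) :
    cdcG false false t = cdcRuns t ∧
    cdcG true true t = cdcRuns (t.dropWhile (fun x => PySem.Str.strip x == "")) ∧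
    cdcG false true t = (t.takeWhile (fun x => PySem.Str.strip x == "")).take 1 ++
      cdcRuns (t.dropWhile (fun x => PySem.Str.strip x == "")) := by
  induction t with
  | nil => simp [cdcG, cdcRuns]
  | cons x xs ih =>
    obtain ⟨ih1, ih2, ih3⟩ := ih
    by_cases hb : (PySem.Str.strip x == "") = true
    · have hbt : cdcBlank x = true := by simpa [cdcBlank] using hb
      have hdw : List.dropWhile (fun y => PySem.Str.strip y == "") (x :: xs)
          = List.dropWhile (fun y => PySem.Str.strip y == "") xs :=
        List.dropWhile_cons_of_pos (p := fun y => PySem.Str.strip y == "") hb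
      have htw : List.takeWhile (fun y => PySem.Str.strip y == "") (x :: xs)
          = x :: List.takeWhile (fun y => PySem.Str.strip y == "") xs :=
        List.takeWhile_cons_of_pos (p := fun y => PySem.Str.strip y == "") hb
      have hR : cdcRuns (x :: xs) =
          (x :: List.takeWhile (fun y => PySem.Str.strip y == "") xs).take 2 ++
            cdcRuns (List.dropWhile (fun y => PySem.Str.strip y == "") xs) := by
        simp only [cdcRuns, hb, if_true]
      refine ⟨?_, ?_, ?_⟩
      · have hL : cdcG false false (x :: xs) = x :: cdcG false true xs := by
          simp [cdcG, hbt]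
        rw [hL, ih3, hR]
        simp
      · have hL : cdcG true true (x :: xs) = cdcG true true xs := by
          simp [cdcG, hbt]
        rw [hL, ih2, hdw]
      · have hL : cdcG false true (x :: xs) = x :: cdcG true true xs := by
          simp [cdcG, hbt]
        rw [hL, ih2, htw, hdw]
        simp
    · have hbf : cdcBlank x = false := by simpa [cdcBlank] using hb
      have hbn : (PySem.Str.strip x == "") = false := by
        simpa using hb
      have hdw : List.dropWhile (fun y => PySem.Str.strip y == "") (x :: xs) = x :: xs :=
        List.dropWhile_cons_of_neg (p := fun y => PySem.Str.strip y == "") (by simp [hbn])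
      have htw : List.takeWhile (fun y => PySem.Str.strip y == "") (x :: xs) = [] :=
        List.takeWhile_cons_of_neg (p := fun y => PySem.Str.strip y == "") (by simp [hbn])
      have hR : cdcRuns (x :: xs) = x :: cdcRuns xs := by
        simp only [cdcRuns, hbn, Bool.false_eq_true, if_false]
      refine ⟨?_, ?_, ?_⟩
      · have hL : cdcG false false (x :: xs) = x :: cdcG false false xs := by
          simp [cdcG, hbf]
        rw [hL, ih1, hR]
      · have hL : cdcG true true (x :: xs) = x :: cdcG false false xs := by
          simp only [cdcG, hbf, Bool.false_and, Bool.false_eq_true, if_false]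
          rw [cdcG_false true false]
        rw [hL, ih1, hdw, hR]
      · have hL : cdcG false true (x :: xs) = x :: cdcG false false xs := by
          simp only [cdcG, hbf, Bool.false_and, Bool.false_eq_true, if_false]
          rw [cdcG_false true false]
        rw [hL, ih1, htw, hdw, hR]
        simp

-- A's first trim stage equals B's first pattern match
lemma cdcTrim1_eq (lines : List String) :
    (if 2 ≤ lines.length ∧ PySem.List.pyGetD lines 0 "" = PySem.List.pyGetD lines 1 "" then
      PySem.List.slice lines (some 1) none
    else lines) = cdcTrim1 lines := by
  match lines with
  | [] => simp [cdcTrim1]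
  | [a] => simp [cdcTrim1]
  | a :: b :: rest =>
    have hg0 : PySem.List.pyGetD (a :: b :: rest) 0 "" = a := PySem.List.pyGetD_zero_cons _ _ _
    have hg1 : PySem.List.pyGetD (a :: b :: rest) 1 "" = b := by
      rw [show ((1:Int)) = ((1:Nat):Int) from rfl, PySem.List.pyGetD_natCast]
      rfl
    rw [hg0, hg1]
    by_cases h : a = b <;> simp [cdcTrim1, h, PySem.List.slice_from_one]

-- A's second trim stage equals B's second pattern match
lemma cdcTrim2_eq (lines : List String) :
    (if 3 ≤ lines.length ∧ PySem.Str.strip (PySem.List.pyGetD lines 0 "") ≠ "" ∧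
        PySem.Str.strip (PySem.List.pyGetD lines 1 "") = "" then
      if (PySem.List.slice lines (some 2) (some 5)).any
          (fun line => PySem.Str.startswith line (PySem.Str.strip (PySem.List.pyGetD lines 0 ""))) then
        PySem.List.slice lines (some 1) none
      else lines
    else lines) = cdcTrim2 lines := by
  match lines with
  | [] => simp [cdcTrim2]
  | [a] => simp [cdcTrim2]
  | [a, b] => simp [cdcTrim2]
  | a :: b :: c :: rest =>
    have hs : PySem.List.slice (a :: b :: c :: rest) (some 2) (some 5) =
        (c :: rest).take 3 := by
      rw [show ((2:Int)) = ((2:Nat):Int) from rfl, show ((5:Int)) = ((5:Nat):Int) from rfl,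
        PySem.List.slice_natCast]
      simp
    have hg0 : PySem.List.pyGetD (a :: b :: c :: rest) 0 "" = a := PySem.List.pyGetD_zero_cons _ _ _
    have hg1 : PySem.List.pyGetD (a :: b :: c :: rest) 1 "" = b := by
      rw [show ((1:Int)) = ((1:Nat):Int) from rfl, PySem.List.pyGetD_natCast]
      rfl
    rw [hs, hg0, hg1]
    simp only [cdcTrim2, List.take_succ_cons, PySem.List.slice_from_one, List.tail_cons]
    by_cases h1 : PySem.Str.strip a ≠ ""
    · by_cases h2 : PySem.Str.strip b = ""
      · by_cases h3 : ((c :: rest).take 3).any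
            (fun line => PySem.Str.startswith line (PySem.Str.strip a)) = true
        · simp [h1, h2, h3]
        · simp [h1, h2, h3]
      · simp [h1, h2]
    · simp at h1; simp [h1]

-- ===== VERDICT (by name: the statement is the Claim_ definition above) =====
theorem clean_document_content_spec : Claim_equal_clean_document_content := by
  intro text _
  unfold Spec_clean_document_content clean_document_content clean_document_content_alt
  by_cases h : (text == "") = true
  · simp [h]
  · simp only [h, Bool.false_eq_true, if_false]
    rw [cdcTrim1_eq, cdcTrim2_eq, cdcA _ [] 0 (by omega)]
    have d1 : decide (2 ≤ (0:Int)) = false := by decide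
    have d2 : decide (1 ≤ (0:Int)) = false := by decide
    rw [d1, d2, (cdcG_runs _).1]
    simp
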